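-- pv_equiv track=rewrite | github.com/YorkBen/projects | NLP/MedicalRecord/FeatureInfer/run.py | merge_infer_result
-- ===== SOURCE A (Python) =====
-- def merge_infer_result(results):
--     """
--     合并多段文本的推理结果
--     """
--     result = {}
--     for r in results:
--         for k, v in r.items():
--             if k not in result:
--                 result[k] = v
--             elif result[k] == 2 or v == 1:
--                 result[k] = v
--
--     return result
-- ===== SOURCE B (Python) =====
-- def merge_infer_result(results):
--     """Group values by key first, then resolve each key by the priority rule:
--     any 1 wins (last one), else the first value != 2 wins, else (all 2) the last value."""
--     groups = {}
--     for r in results: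
--         for k, v in r.items():
--             groups.setdefault(k, []).append(v)
--     out = {}
--     for k, vs in groups.items():
--         if any(v == 1 for v in vs):
--             out[k] = next(v for v in reversed(vs) if v == 1)
--         else:
--             out[k] = next((v for v in vs if v != 2), vs[-1])
--     return out
-- ===== Notes on version B (the rewrite author's own statement) =====
-- stated objective: alternative
-- what changed: Replaces A's stateful if/elif fold over a running result dict with a two-phase design: group all values per key, then compute each key's answer directly from its value list by the priority characterization (any 1 wins, else first value != 2, else the last all-2 value).
import Mathlib
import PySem

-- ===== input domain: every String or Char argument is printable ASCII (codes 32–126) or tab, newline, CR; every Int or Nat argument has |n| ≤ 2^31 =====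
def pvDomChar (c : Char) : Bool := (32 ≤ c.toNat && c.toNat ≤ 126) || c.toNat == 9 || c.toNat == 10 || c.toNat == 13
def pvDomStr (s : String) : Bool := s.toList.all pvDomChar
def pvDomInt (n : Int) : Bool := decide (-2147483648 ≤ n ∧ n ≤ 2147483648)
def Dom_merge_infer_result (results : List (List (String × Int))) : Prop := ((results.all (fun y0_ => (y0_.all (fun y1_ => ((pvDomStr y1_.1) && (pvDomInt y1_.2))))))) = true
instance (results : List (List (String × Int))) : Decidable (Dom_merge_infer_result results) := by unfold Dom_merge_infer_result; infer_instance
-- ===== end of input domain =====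

-- B merges by grouping every value per key first and then resolving each key from its
-- value list by the priority rule, instead of A's stateful if/elif fold; same cost.


-- ===== PORT A =====
-- 'result = {}; for r in results: for k, v in r.items(): …' — each inner list is a Python
-- dict literal, so it is materialised with PySem.Dict.ofList before iterating its items.
def merge_infer_result (results : List (List (String × Int))) : List (String × Int) :=
  (results.foldl (fun result r =>
    (PySem.Dict.ofList r).items.foldl (fun result kv =>
      match result.get? kv.1 with
      | none => result.insert kv.1 kv.2                 -- k not in result
      | some cur =>
        if cur == 2 || kv.2 == 1 then result.insert kv.1 kv.2
        else result) result)
    (PySem.Dict.empty)).items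

-- ===== PORT B =====
-- per-key resolution from the full value list (Source B's two generator expressions)
def pvResolve (vs : List Int) : Int :=
  if vs.any (fun v => v == 1) then
    ((vs.reverse.find? (fun v => v == 1)).getD 0)       -- next(v for v in reversed(vs) if v == 1)
  else
    ((vs.find? (fun v => !(v == 2))).getD (vs.getLastD 0))  -- next((v for v in vs if v != 2), vs[-1])

def merge_infer_result_alt (results : List (List (String × Int))) : List (String × Int) :=
  let groups := results.foldl (fun g r =>
    (PySem.Dict.ofList r).items.foldl (fun g kv =>
      g.modify kv.1 [] (fun vs => vs ++ [kv.2])) g)     -- groups.setdefault(k, []).append(v)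
    (PySem.Dict.empty)
  groups.items.map (fun kv => (kv.1, pvResolve kv.2))   -- out[k] = … for each key, fresh keys in order

-- ===== PRECONDITION & SPEC =====
def Spec_merge_infer_result (results : List (List (String × Int))) (out : List (String × Int)) : Prop := out = merge_infer_result_alt results
instance (results : List (List (String × Int))) (out : List (String × Int)) : Decidable (Spec_merge_infer_result results out) := by unfold Spec_merge_infer_result; infer_instance

-- ===== CLAIM (what is proved, stated in full; the proofs are below) =====
def Claim_equal_merge_infer_result : Prop := ∀ (results : List (List (String × Int))), Dom_merge_infer_result results → Spec_merge_infer_result results (merge_infer_result results)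

-- ===== LEMMAS AND PROOFS =====

-- A's single update step / B's single grouping step, named for the proofs
def pvStepA (d : PySem.Dict String Int) (kv : String × Int) : PySem.Dict String Int :=
  match d.get? kv.1 with
  | none => d.insert kv.1 kv.2
  | some cur => if cur == 2 || kv.2 == 1 then d.insert kv.1 kv.2 else d

def pvStepG (g : PySem.Dict String (List Int)) (kv : String × Int) : PySem.Dict String (List Int) :=
  g.modify kv.1 [] (fun vs => vs ++ [kv.2])

theorem pvResolve_single (v : Int) : pvResolve [v] = v := by
  by_cases h1 : v = 1 <;> by_cases h2 : v = 2 <;>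
    simp [pvResolve, h1, h2]

theorem pvResolve_append (vs : List Int) (v : Int) (hne : vs ≠ []) :
    pvResolve (vs ++ [v]) = if pvResolve vs == 2 || v == 1 then v else pvResolve vs := by
  by_cases hv1 : v = 1
  · subst hv1
    have hany' : ((vs ++ [1]).any (fun v => v == (1 : Int))) = true := by simp
    have hrev : (vs ++ [(1 : Int)]).reverse.find? (fun v => v == 1) = some 1 := by
      rw [List.reverse_append]; rfl
    rw [pvResolve, if_pos hany', hrev]
    simp
  · have hv1' : ((v == (1 : Int))) = false := by simp [hv1]
    by_cases hany : vs.any (fun v => v == (1 : Int)) = true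
    · -- some earlier 1: both sides are pvResolve vs (which is 1)
      have hfind : vs.reverse.find? (fun v => v == (1 : Int)) = some 1 := by
        rcases hf : vs.reverse.find? (fun v => v == (1 : Int)) with _ | w
        · obtain ⟨x, hx, hx1⟩ := List.any_eq_true.mp hany
          have := List.find?_eq_none.mp hf x (List.mem_reverse.mpr hx)
          exact absurd hx1 (by simpa using this)
        · have := List.find?_some hf
          rw [show w = 1 by simpa using this] at hf ⊢
      have hany' : ((vs ++ [v]).any (fun v => v == (1 : Int))) = true := by
        rw [List.any_append, hany, Bool.true_or]
      have hrev : (vs ++ [v]).reverse.find? (fun v => v == (1 : Int)) =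
          vs.reverse.find? (fun v => v == (1 : Int)) := by
        rw [List.reverse_append, show [v].reverse = [v] from rfl, List.find?_append]
        simp [hv1']
      have hres : pvResolve vs = 1 := by rw [pvResolve, if_pos hany, hfind]; rfl
      rw [pvResolve, if_pos hany', hrev, hfind, hres]
      simp [hv1]
    · have hanyf : vs.any (fun v => v == (1 : Int)) = false := Bool.eq_false_iff.mpr hany
      have hany' : ((vs ++ [v]).any (fun v => v == (1 : Int))) = false := by
        rw [List.any_append, hanyf]; simp [hv1']
      rcases h2 : vs.find? (fun v => !(v == (2 : Int))) with _ | w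
      · -- all of vs equal 2: A's running value is 2, so v always wins; B falls back accordingly
        have hall : ∀ x ∈ vs, x = 2 := by
          intro x hx
          have := List.find?_eq_none.mp h2 x hx
          simpa using this
        have hlast : vs.getLastD 0 = 2 := by
          rw [List.getLastD_eq_getLast? , List.getLast?_eq_some_getLast hne]
          exact hall _ (List.getLast_mem hne)
        have hres : pvResolve vs = 2 := by
          rw [pvResolve, if_neg (by rw [hanyf]; exact Bool.false_ne_true), h2,
            Option.getD_none, hlast]
        have hfind' : (vs ++ [v]).find? (fun v => !(v == (2 : Int))) =
            if v = 2 then none else some v := by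
          rw [List.find?_append, h2, Option.none_or]
          by_cases hv2 : v = 2 <;> simp [hv2]
        have hcond : (pvResolve vs == 2 || v == 1) = true := by rw [hres]; rfl
        rw [pvResolve, if_neg (by rw [hany']; exact Bool.false_ne_true), hfind',
          if_pos hcond, List.getLastD_concat]
        by_cases hv2 : v = 2 <;> simp [hv2]
      · -- first value ≠ 2 exists in vs and stays the result
        have hw2 : (w == (2 : Int)) = false := by
          have := List.find?_some h2
          simpa using this
        have hres : pvResolve vs = w := by
          rw [pvResolve, if_neg (by rw [hanyf]; exact Bool.false_ne_true), h2, Option.getD_some]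
        have hfind' : (vs ++ [v]).find? (fun v => !(v == (2 : Int))) = some w := by
          rw [List.find?_append, h2, Option.some_or]
        have hcond : (pvResolve vs == 2 || v == 1) = false := by
          rw [hres, hv1', hw2, Bool.or_false]
        rw [pvResolve, if_neg (by rw [hany']; exact Bool.false_ne_true), hfind',
          Option.getD_some, if_neg (by rw [hcond]; exact Bool.false_ne_true), hres]

-- lookup in a value-mapped literal dict
theorem get?_mk_map {ν ν' : Type} (f : ν → ν') (l : List (String × ν)) (k : String) :
    (PySem.Dict.mk (l.map (fun p => (p.1, f p.2)))).get? k
      = ((PySem.Dict.mk l).get? k).map f := by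
  induction l with
  | nil => rfl
  | cons p t ih =>
    obtain ⟨a, b⟩ := p
    rw [List.map_cons, PySem.Dict.get?_mk_cons, PySem.Dict.get?_mk_cons]
    by_cases h : (a == k) = true
    · rw [if_pos h, if_pos h, Option.map_some]
    · rw [if_neg h, if_neg h, ih]

-- the invariant: A's dict is the per-key resolution of B's groups dict, stepwise
theorem pv_inv_step (d : PySem.Dict String Int) (g : PySem.Dict String (List Int))
    (hnd : g.keys.Nodup)
    (hne : ∀ p ∈ g.items, p.2 ≠ [])
    (hi : d.items = g.items.map (fun p => (p.1, pvResolve p.2))) (kv : String × Int) :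
    (pvStepA d kv).items = (pvStepG g kv).items.map (fun p => (p.1, pvResolve p.2)) := by
  obtain ⟨k, v⟩ := kv
  have hd : d = PySem.Dict.mk (g.items.map (fun p => (p.1, pvResolve p.2))) := by
    cases d; simpa [PySem.Dict.items] using hi
  have hget : d.get? k = (g.get? k).map pvResolve := by
    rw [hd, get?_mk_map]
  have hmod : pvStepG g (k, v) = g.insert k (g.getD k [] ++ [v]) := rfl
  rcases hg : g.get? k with _ | vs
  · -- fresh key: both append
    have hgc : g.contains k = false := by
      rw [PySem.Dict.contains_eq_isSome_get?, hg]; rfl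
    have hdc : d.contains k = false := by
      rw [PySem.Dict.contains_eq_isSome_get?, hget, hg]; rfl
    have hgD : g.getD k [] = [] := PySem.Dict.getD_of_not_contains _ _ hgc
    have hA : pvStepA d (k, v) = d.insert k v := by
      unfold pvStepA; rw [hget, hg]; rfl
    rw [hA, hmod, hgD, PySem.Dict.items_insert_of_not_contains _ _ hdc,
      PySem.Dict.items_insert_of_not_contains _ _ hgc, hi]
    simp [pvResolve_single]
  · -- existing key: A conditionally overwrites, B appends to the group
    have hvs : vs ≠ [] := hne (k, vs) (PySem.Dict.mem_items_of_get?_eq_some _ hg)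
    have hgc : g.contains k = true := by
      rw [PySem.Dict.contains_eq_isSome_get?, hg]; rfl
    have hdc : d.contains k = true := by
      rw [PySem.Dict.contains_eq_isSome_get?, hget, hg]; rfl
    have hgD : g.getD k [] = vs := PySem.Dict.getD_of_get?_eq_some _ _ hg
    have hA : pvStepA d (k, v) =
        if pvResolve vs == 2 || v == 1 then d.insert k v else d := by
      unfold pvStepA; rw [hget, hg]; rfl
    have hG : (pvStepG g (k, v)).items =
        g.items.map (fun p => if p.1 == k then (k, vs ++ [v]) else p) := by
      rw [hmod, hgD, PySem.Dict.items_insert_of_contains _ _ hgc]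
    have hkey : ∀ p ∈ g.items, p.1 = k → p.2 = vs := by
      intro p hp hpk
      have h := PySem.Dict.get?_of_mem_items g hp hnd
      rw [hpk, hg] at h
      exact (Option.some_inj.mp h).symm
    rw [hA, hG, List.map_map]
    by_cases hc : (pvResolve vs == 2 || v == 1) = true
    · rw [if_pos hc, PySem.Dict.items_insert_of_contains _ _ hdc, hi, List.map_map]
      apply List.map_congr_left
      intro p hp
      by_cases hpk : (p.1 == k) = true
      · have h2 : p.2 = vs := hkey p hp (by simpa using hpk)
        simp [Function.comp, hpk, pvResolve_append vs v hvs, hc]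
      · simp [Function.comp, hpk]
    · rw [if_neg hc, hi]
      apply List.map_congr_left
      intro p hp
      by_cases hpk : (p.1 == k) = true
      · have h2 : p.2 = vs := hkey p hp (by simpa using hpk)
        have hres := pvResolve_append vs v hvs
        rw [if_neg (by rw [Bool.eq_false_iff.mpr hc]; exact Bool.false_ne_true)] at hres
        simp [Function.comp, hres, h2, (by simpa using hpk : p.1 = k)]
      · simp [Function.comp, hpk]

theorem pv_inv_fold (l : List (String × Int)) :
    ∀ (d : PySem.Dict String Int) (g : PySem.Dict String (List Int)),
    g.keys.Nodup → (∀ p ∈ g.items, p.2 ≠ []) →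
    d.items = g.items.map (fun p => (p.1, pvResolve p.2)) →
    (l.foldl pvStepA d).items
      = (l.foldl pvStepG g).items.map (fun p => (p.1, pvResolve p.2)) := by
  induction l with
  | nil => intro d g _ _ hi; simpa using hi
  | cons kv t ih =>
    intro d g hnd hne hi
    simp only [List.foldl_cons]
    refine ih _ _ ?_ ?_ (pv_inv_step d g hnd hne hi kv)
    · exact PySem.Dict.nodup_keys_insert _ _ _ hnd
    · intro p hp
      rcases (PySem.Dict.mem_items_insert _ _ _ _).mp hp with h | h
      · subst h; simp
      · exact hne p h.1

-- fold over results with an inner fold = fold over the flattened item stream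
theorem pv_foldl_flat {σ : Type} (step : σ → (String × Int) → σ)
    (results : List (List (String × Int))) (init : σ) :
    results.foldl (fun acc r => (PySem.Dict.ofList r).items.foldl step acc) init
      = (results.flatMap (fun r => (PySem.Dict.ofList r).items)).foldl step init := by
  induction results generalizing init with
  | nil => rfl
  | cons r t ih => simp [List.foldl_append, ih]

-- ===== VERDICT (by name: the statement is the Claim_ definition above) =====
theorem merge_infer_result_spec : Claim_equal_merge_infer_result := by
  intro results _
  unfold Spec_merge_infer_result merge_infer_result merge_infer_result_alt
  have hA : (fun (result : PySem.Dict String Int) (kv : String × Int) =>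
      match result.get? kv.1 with
      | none => result.insert kv.1 kv.2
      | some cur => if cur == 2 || kv.2 == 1 then result.insert kv.1 kv.2 else result)
      = pvStepA := rfl
  have hG : (fun (g : PySem.Dict String (List Int)) (kv : String × Int) =>
      g.modify kv.1 [] (fun vs => vs ++ [kv.2])) = pvStepG := rfl
  rw [hA, hG, pv_foldl_flat pvStepA, pv_foldl_flat pvStepG]
  exact pv_inv_fold _ _ _ (by simp [PySem.Dict.empty, PySem.Dict.keys])
    (by intro p hp; simp [PySem.Dict.empty] at hp) rfl
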